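-- pv_equiv track=rewrite | github.com/Bach2324/Discrete_Structures | HW7/first_D_digit_Lucas.py | first_D_digit_Lucas
-- ===== SOURCE A (Python) =====
-- def first_D_digit_Lucas(D):
--     l0 = 2
--     l1 = 1
--     while(len(str(l0)) < D):
--         l2 = l0 + l1
--         l0 = l1
--         l1 = l2
--     return l0
-- ===== SOURCE B (Python) =====
-- def first_D_digit_Lucas(D):
--     # First entry of the sequence 2, 1, 3, 4, 7, ... with at least D digits.
--     if D <= 1:
--         return 2
--     t = 10 ** (D - 1)
--
--     def fib_pair(n):
--         # (F_n, F_{n+1}) by fast doubling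
--         if n == 0:
--             return (0, 1)
--         a, b = fib_pair(n // 2)
--         c = a * (2 * b - a)
--         d = a * a + b * b
--         if n % 2 == 1:
--             return (d, c + d)
--         return (c, d)
--
--     def luc(n):
--         a, b = fib_pair(n)
--         return 2 * b - a
--
--     hi = 1
--     while luc(hi) < t:
--         hi *= 2
--     lo = 1
--     while lo < hi:
--         mid = (lo + hi) // 2
--         if luc(mid) < t:
--             lo = mid + 1
--         else:
--             hi = mid
--     return luc(lo)
-- ===== Notes on version B (the rewrite author's own statement) =====
-- stated objective: faster
-- what changed: B replaces A's linear scan with per-step str() digit counting by fast-doubling Fibonacci/Lucas evaluation plus exponential growth and binary search for the first index whose Lucas number reaches 10**(D-1); Pre_ excludes D > 4300, where A raises ValueError (CPython's default int-to-str digit limit is exceeded inside len(str(l0))).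
import Mathlib
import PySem

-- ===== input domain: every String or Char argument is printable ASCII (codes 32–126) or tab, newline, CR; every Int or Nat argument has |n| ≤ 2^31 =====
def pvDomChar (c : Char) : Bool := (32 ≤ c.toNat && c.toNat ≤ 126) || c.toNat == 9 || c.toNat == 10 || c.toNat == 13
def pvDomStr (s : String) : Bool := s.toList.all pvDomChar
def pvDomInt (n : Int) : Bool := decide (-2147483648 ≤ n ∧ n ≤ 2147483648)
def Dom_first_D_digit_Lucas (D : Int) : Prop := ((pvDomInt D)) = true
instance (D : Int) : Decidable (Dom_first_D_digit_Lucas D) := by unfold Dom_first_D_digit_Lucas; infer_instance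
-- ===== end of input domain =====

-- B computes the same first-Lucas-number-with-≥D-digits by fast doubling plus exponential + binary
-- search on the index instead of A's linear scan with str()-based digit counting (faster).

-- ===== PORT A =====
-- A's while-loop; the fuel 8*D.toNat+8 is only a totalisation guard, proved sufficient below.
def lucasLoopA : Nat → Int → Int → Int → Int
  | 0, _, l0, _ => l0
  | fuel+1, D, l0, l1 =>
    if PySem.Str.len (PySem.Int.toStr l0) < D then lucasLoopA fuel D l1 (l0 + l1) else l0

def first_D_digit_Lucas (D : Int) : Int := lucasLoopA (8 * D.toNat + 8) D 2 1

-- ===== PORT B =====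
-- fib_pair of Source B: (F_n, F_{n+1}) by fast doubling
def fibPair (n : Nat) : Int × Int :=
  if h : n = 0 then (0, 1)
  else
    let p := fibPair (n / 2)
    let a := p.1
    let b := p.2
    let c := a * (2 * b - a)
    let d := a * a + b * b
    if n % 2 = 1 then (d, c + d) else (c, d)
decreasing_by exact Nat.div_lt_self (Nat.pos_of_ne_zero h) (by omega)

-- luc of Source B
def lucB (n : Nat) : Int := 2 * (fibPair n).2 - (fibPair n).1

-- Source B's "while luc(hi) < t: hi *= 2"; the fuel 64 is only a totalisation guard, proved sufficient below.
def growHi (t : Int) : Nat → Nat → Nat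
  | 0, hi => hi
  | fuel+1, hi => if lucB hi < t then growHi t fuel (hi * 2) else hi

-- Source B's "while lo < hi" binary search
def bsearch (t : Int) (lo hi : Nat) : Nat :=
  if lo < hi then
    let mid := (lo + hi) / 2
    if lucB mid < t then bsearch t (mid + 1) hi else bsearch t lo mid
  else lo
termination_by hi - lo
decreasing_by all_goals omega

def first_D_digit_Lucas_alt (D : Int) : Int :=
  if D ≤ 1 then 2
  else
    let t : Int := 10 ^ (D - 1).toNat
    let hi := growHi t 64 1
    lucB (bsearch t 1 hi)

-- ===== PRECONDITION & SPEC =====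
-- Pre_ excludes D > 4300: there A raises ValueError (CPython's default 4300-digit limit on the
-- int-to-str conversion inside len(str(l0))); A returns normally on every D ≤ 4300.
def Pre_first_D_digit_Lucas (D : Int) : Prop := D ≤ 4300
instance (D : Int) : Decidable (Pre_first_D_digit_Lucas D) := by unfold Pre_first_D_digit_Lucas; infer_instance
def pvWitness_first_D_digit_Lucas : Int := 3

def Spec_first_D_digit_Lucas (D : Int) (out : Int) : Prop := out = first_D_digit_Lucas_alt D
instance (D : Int) (out : Int) : Decidable (Spec_first_D_digit_Lucas D out) := by unfold Spec_first_D_digit_Lucas; infer_instance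

-- ===== CLAIM (what is proved, stated in full; the proofs are below) =====
def Claim_equal_first_D_digit_Lucas : Prop := ∀ (D : Int), Dom_first_D_digit_Lucas D → Pre_first_D_digit_Lucas D → Spec_first_D_digit_Lucas D (first_D_digit_Lucas D)

-- ===== LEMMAS AND PROOFS =====

-- The reference sequence A iterates through: 2, 1, 3, 4, 7, 11, …
def Luc : Nat → Nat
  | 0 => 2
  | 1 => 1
  | n+2 => Luc n + Luc (n+1)

lemma Luc_pos : ∀ n, 1 ≤ Luc n := by
  intro n
  induction n using Luc.induct with
  | case1 => simp [Luc]
  | case2 => simp [Luc]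
  | case3 n ih1 ih2 => simp [Luc]; omega

lemma Luc_mono {a b : Nat} (ha : 1 ≤ a) (hab : a ≤ b) : Luc a ≤ Luc b := by
  induction b with
  | zero => omega
  | succ b ih =>
    rcases Nat.lt_or_ge a (b+1) with h | h
    · have hb : 1 ≤ b := by omega
      have h1 : Luc a ≤ Luc b := ih (by omega)
      have h2 : Luc b ≤ Luc (b+1) := by
        rcases b with _ | b
        · omega
        · have he : Luc (b+1+1) = Luc b + Luc (b+1) := rfl
          have := Luc_pos b
          omega
      omega
    · have : a = b + 1 := by omega
      simp [this]

lemma Luc_lower : ∀ m, 2 ^ m ≤ Luc (2*m+1) := by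
  intro m
  induction m with
  | zero => simp [Luc]
  | succ m ih =>
    have h1 : Luc (2*m+1) ≤ Luc (2*m+2) := Luc_mono (by omega) (by omega)
    have h2 : Luc (2*(m+1)+1) = Luc (2*m+1) + Luc (2*m+2) := by
      have : 2*(m+1)+1 = (2*m+1) + 2 := by omega
      rw [this]; rfl
    rw [pow_succ]; omega

lemma exists_Luc (t : Nat) : ∃ n, t ≤ Luc n :=
  ⟨2*t+1, le_trans (le_of_lt Nat.lt_two_pow_self) (Luc_lower t)⟩

def lucN (t : Nat) : Nat := Nat.find (exists_Luc t)

lemma lucN_spec (t : Nat) : t ≤ Luc (lucN t) := Nat.find_spec (exists_Luc t)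
lemma lucN_le {t n : Nat} (h : t ≤ Luc n) : lucN t ≤ n := Nat.find_min' (exists_Luc t) h
lemma lucN_pos {t : Nat} (ht : 3 ≤ t) : 1 ≤ lucN t := by
  rcases Nat.eq_zero_or_pos (lucN t) with h0 | h0
  · have := lucN_spec t
    rw [h0] at this
    simp [Luc] at this
    omega
  · omega

lemma lt_lucN {t k : Nat} (ht : 3 ≤ t) (h : Luc k < t) : k < lucN t := by
  by_contra hk
  have hk' : lucN t ≤ k := by omega
  have h1 := Luc_mono (lucN_pos ht) hk'
  have h2 := lucN_spec t
  omega

-- fast doubling is Fibonacci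
lemma fibPair_eq : ∀ n, fibPair n = ((Nat.fib n : Int), (Nat.fib (n+1) : Int)) := by
  intro n
  induction n using Nat.strong_induction_on with
  | _ n ih =>
    rw [fibPair]
    by_cases h : n = 0
    · simp [h]
    · have hlt : n / 2 < n := Nat.div_lt_self (Nat.pos_of_ne_zero h) (by omega)
      rw [ih _ hlt]
      have hfle : Nat.fib (n/2) ≤ 2 * Nat.fib (n/2 + 1) := by
        have := Nat.fib_mono (Nat.le_succ (n/2))
        simp only [Nat.succ_eq_add_one] at this
        omega
      rw [dif_neg h]
      by_cases hodd : n % 2 = 1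
      · have hn : n = 2 * (n/2) + 1 := by omega
        simp only [hodd, if_pos, Prod.mk.injEq]
        refine ⟨?_, ?_⟩
        · conv_rhs => rw [hn]
          rw [Nat.fib_two_mul_add_one]; push_cast; ring
        · conv_rhs => rw [show n + 1 = 2*(n/2) + 2 by omega]
          rw [Nat.fib_add_two, Nat.fib_two_mul, Nat.fib_two_mul_add_one]
          push_cast [Nat.cast_sub hfle]; ring
      · have hn : n = 2 * (n/2) := by omega
        simp only [hodd, if_false, Prod.mk.injEq]
        refine ⟨?_, ?_⟩
        · conv_rhs => rw [hn]
          rw [Nat.fib_two_mul]; push_cast [Nat.cast_sub hfle]; ring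
        · conv_rhs => rw [show n + 1 = 2*(n/2) + 1 by omega]
          rw [Nat.fib_two_mul_add_one]; push_cast; ring

lemma Luc_fib : ∀ n, (Luc n : Int) = 2 * (Nat.fib (n+1) : Int) - (Nat.fib n : Int) := by
  intro n
  induction n using Luc.induct with
  | case1 => simp [Luc]
  | case2 => simp [Luc]
  | case3 n ih1 ih2 =>
    have h1 : Luc (n+2) = Luc n + Luc (n+1) := rfl
    have h2 : Nat.fib (n+2) = Nat.fib n + Nat.fib (n+1) := Nat.fib_add_two
    have h3 : Nat.fib (n+3) = Nat.fib (n+1) + Nat.fib (n+2) := Nat.fib_add_two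
    push_cast [h1, h2, h3] at *
    omega

lemma lucB_eq (n : Nat) : lucB n = (Luc n : Int) := by
  rw [lucB, fibPair_eq, Luc_fib]

-- exact digit-count bounds for Nat.toDigits (lower bound; upper bound is Nat.toDigits_length)
lemma lt_pow_toDigitsCore_length :
    ∀ f n, n < f → n < 10 ^ (Nat.toDigitsCore 10 f n []).length := by
  intro f
  induction f with
  | zero => omega
  | succ f ih =>
    intro n hn
    rw [Nat.toDigitsCore]
    by_cases h : n / 10 = 0
    · simp only [h, if_pos]
      have : n < 10 := by omega
      simpa using this
    · simp only [h, if_false]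
      rw [Nat.toDigitsCore_lens_eq]
      have hlt : n / 10 < f := by omega
      have := ih (n / 10) hlt
      calc n < 10 * (n / 10) + 10 := by omega
        _ ≤ 10 * 10 ^ (Nat.toDigitsCore 10 f (n/10) []).length := by omega
        _ = 10 ^ ((Nat.toDigitsCore 10 f (n/10) []).length + 1) := by rw [pow_succ]; ring

lemma lt_pow_toDigits_length (n : Nat) : n < 10 ^ (Nat.toDigits 10 n).length :=
  lt_pow_toDigitsCore_length (n+1) n (by omega)

lemma len_toStr_nat (m : Nat) :
    PySem.Str.len (PySem.Int.toStr (m : Int)) = ((Nat.toDigits 10 m).length : Int) := by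
  rw [PySem.Str.len_eq, PySem.Int.toList_toStr]
  simp only [PySem.Int.toChars, Int.toNat_natCast]
  rw [if_neg (show ¬((m : Int) < 0) by omega)]

-- the loop condition of A, for a state value m with 2 ≤ D: "len(str(m)) < D" ↔ m < 10^(D-1)
lemma cond_iff (m : Nat) (D : Int) (hD : 2 ≤ D) :
    (PySem.Str.len (PySem.Int.toStr (m : Int)) < D) ↔ m < 10 ^ (D-1).toNat := by
  rw [len_toStr_nat]
  constructor
  · intro h
    have hlen : (Nat.toDigits 10 m).length ≤ (D-1).toNat := by omega
    calc m < 10 ^ (Nat.toDigits 10 m).length := lt_pow_toDigits_length m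
      _ ≤ 10 ^ (D-1).toNat := Nat.pow_le_pow_right (by omega) hlen
  · intro h
    have := Nat.toDigits_length 10 m (D-1).toNat (by omega) h
    omega

-- A's loop returns Luc (lucN t)
lemma loopA_eq (D : Int) (hD : 2 ≤ D) :
    ∀ (fuel k : Nat), k ≤ lucN (10 ^ (D-1).toNat) → lucN (10 ^ (D-1).toNat) ≤ k + fuel →
      lucasLoopA fuel D (Luc k) (Luc (k+1)) = (Luc (lucN (10 ^ (D-1).toNat)) : Int) := by
  intro fuel
  induction fuel with
  | zero =>
    intro k h1 h2
    have : k = lucN (10 ^ (D-1).toNat) := by omega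
    simp [lucasLoopA, this]
  | succ fuel ih =>
    intro k h1 h2
    rw [lucasLoopA]
    have ht : 10 ≤ 10 ^ (D-1).toNat := by
      calc (10:Nat) = 10 ^ 1 := by norm_num
        _ ≤ 10 ^ (D-1).toNat := Nat.pow_le_pow_right (by omega) (by omega)
    by_cases hc : Luc k < 10 ^ (D-1).toNat
    · have hk : k < lucN (10 ^ (D-1).toNat) := lt_lucN (by omega) hc
      rw [if_pos ((cond_iff (Luc k) D hD).mpr hc)]
      have hsum : (Luc k : Int) + (Luc (k+1) : Int) = ((Luc (k+2) : Nat) : Int) := by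
        have : Luc (k+2) = Luc k + Luc (k+1) := rfl
        push_cast [this]; ring
      rw [hsum]
      exact ih (k+1) (by omega) (by omega)
    · have hk : lucN (10 ^ (D-1).toNat) = k := by
        have := lucN_le (Nat.le_of_not_lt hc); omega
      rw [if_neg (by rw [cond_iff (Luc k) D hD]; omega), hk]

-- the fuel of port A suffices
lemma lucN_bound (D : Int) (hD : 2 ≤ D) : lucN (10 ^ (D-1).toNat) ≤ 8 * D.toNat + 8 := by
  set e := (D-1).toNat with he
  have h10 : (10:Nat) ^ e ≤ 2 ^ (4 * e) := by
    calc (10:Nat) ^ e ≤ 16 ^ e := Nat.pow_le_pow_left (by omega) e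
      _ = 2 ^ (4 * e) := by rw [show (16:Nat) = 2^4 by norm_num, ← pow_mul]
  have h := le_trans h10 (Luc_lower (4*e))
  have := lucN_le h
  omega

-- growHi reaches a hi with t ≤ lucB hi, given some doubling count ≤ fuel works
lemma growHi_spec (t : Int) :
    ∀ (fuel hi : Nat), (∃ j, j ≤ fuel ∧ t ≤ lucB (hi * 2 ^ j)) →
      t ≤ lucB (growHi t fuel hi) := by
  intro fuel
  induction fuel with
  | zero =>
    intro hi ⟨j, hj, h⟩
    have : j = 0 := by omega
    subst this; simpa [growHi] using h
  | succ fuel ih =>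
    intro hi ⟨j, hj, h⟩
    rw [growHi]
    by_cases hc : lucB hi < t
    · rw [if_pos hc]
      apply ih
      have hj0 : j ≠ 0 := by rintro rfl; simp at h; omega
      refine ⟨j - 1, by omega, ?_⟩
      have : hi * 2 * 2 ^ (j-1) = hi * 2 ^ j := by
        rw [mul_assoc, ← pow_succ']
        congr 2
        omega
      rw [this]; exact h
    · rw [if_neg hc]; omega

lemma bsearch_eq (t : Nat) (ht : 10 ≤ t) :
    ∀ (lo hi : Nat), lo ≤ lucN t → lucN t ≤ hi → bsearch (t : Int) lo hi = lucN t := by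
  intro lo hi
  induction lo, hi using bsearch.induct (t : Int) with
  | case1 lo hi hlt mid hc ih =>
    intro h1 h2
    have hm : mid = (lo + hi) / 2 := rfl
    rw [bsearch]
    simp only [if_pos hlt, show (lo + hi) / 2 = mid from rfl, if_pos hc]
    apply ih ?_ h2
    rw [lucB_eq] at hc
    have hmlt : Luc mid < t := by exact_mod_cast hc
    have := lt_lucN (by omega) hmlt
    omega
  | case2 lo hi hlt mid hc ih =>
    intro h1 h2
    have hm : mid = (lo + hi) / 2 := rfl
    rw [bsearch]
    simp only [if_pos hlt, show (lo + hi) / 2 = mid from rfl, if_neg hc]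
    apply ih h1
    rw [lucB_eq] at hc
    have hmge : t ≤ Luc mid := by exact_mod_cast not_lt.mp hc
    exact lucN_le hmge
  | case3 lo hi hlt =>
    intro h1 h2
    rw [bsearch, if_neg hlt]
    omega

-- ===== VERDICT (by name: the statement is the Claim_ definition above) =====
theorem first_D_digit_Lucas_spec : Claim_equal_first_D_digit_Lucas := by
  intro D hDom hPre
  unfold Spec_first_D_digit_Lucas first_D_digit_Lucas first_D_digit_Lucas_alt
  by_cases hD1 : D ≤ 1
  · -- both return 2 immediately
    rw [if_pos hD1]
    have : 8 * D.toNat + 8 = (8 * D.toNat + 7) + 1 := by omega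
    rw [this, lucasLoopA]
    rw [if_neg (by
      have : PySem.Str.len (PySem.Int.toStr 2) = 1 := by decide
      rw [this]; omega)]
  · rw [if_neg hD1]
    show lucasLoopA (8 * D.toNat + 8) D 2 1 =
      lucB (bsearch ((10:Int) ^ (D-1).toNat) 1 (growHi ((10:Int) ^ (D-1).toNat) 64 1))
    have hD : 2 ≤ D := by omega
    set t : Nat := 10 ^ (D-1).toNat with htdef
    have ht10 : 10 ≤ t := by
      have he : 1 ≤ (D-1).toNat := by omega
      calc (10:Nat) = 10 ^ 1 := by norm_num
        _ ≤ 10 ^ (D-1).toNat := Nat.pow_le_pow_right (by omega) he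
    have htcast : (10:Int) ^ (D-1).toNat = (t : Int) := by push_cast [htdef]; ring
    -- A side
    have hA : lucasLoopA (8 * D.toNat + 8) D 2 1 = (Luc (lucN t) : Int) := by
      have h0 : ((Luc 0 : Nat) : Int) = 2 := by simp [Luc]
      have h1 : ((Luc 1 : Nat) : Int) = 1 := by simp [Luc]
      rw [← h0, ← h1]
      exact loopA_eq D hD (8 * D.toNat + 8) 0 (by omega) (by
        have := lucN_bound D hD; omega)
    -- B side
    have hDle : D ≤ 4300 := hPre
    have hBhi : (t : Int) ≤ lucB (growHi (t : Int) 64 1) := by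
      apply growHi_spec
      refine ⟨16, by omega, ?_⟩
      rw [lucB_eq]
      have h1 : t ≤ Luc (8 * (D-1).toNat + 1) := by
        have h10 : (10:Nat) ^ (D-1).toNat ≤ 2 ^ (4 * (D-1).toNat) := by
          calc (10:Nat) ^ (D-1).toNat ≤ 16 ^ (D-1).toNat := Nat.pow_le_pow_left (by omega) _
            _ = 2 ^ (4 * (D-1).toNat) := by rw [show (16:Nat) = 2^4 by norm_num, ← pow_mul]
        have h2 : 2 ^ (4 * (D-1).toNat) ≤ Luc (2 * (4 * (D-1).toNat) + 1) := Luc_lower _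
        have h3 : 2 * (4 * (D-1).toNat) + 1 = 8 * (D-1).toNat + 1 := by omega
        rw [h3] at h2
        exact le_trans h10 h2
      have h2 : Luc (8 * (D-1).toNat + 1) ≤ Luc (1 * 2 ^ 16) := by
        apply Luc_mono (by omega)
        have : (D-1).toNat ≤ 4299 := by omega
        have : 8 * (D-1).toNat + 1 ≤ 34393 := by omega
        calc 8 * (D-1).toNat + 1 ≤ 34393 := this
          _ ≤ 1 * 2 ^ 16 := by norm_num
      exact_mod_cast le_trans h1 h2
    have hNhi : lucN t ≤ growHi (t : Int) 64 1 := by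
      apply lucN_le
      rw [lucB_eq] at hBhi
      exact_mod_cast hBhi
    have hN1 : 1 ≤ lucN t := lucN_pos (by omega)
    rw [htcast, bsearch_eq t ht10 1 _ hN1 hNhi, lucB_eq, hA]
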